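-- pv_equiv track=rewrite | github.com/Brian-Ckwu/aicup-2022-nlp | postprocess.py | merge_offsets
-- ===== SOURCE A (Python) =====
-- from typing import List, Tuple
--
-- def merge_offsets(offsets: List[List[int]], mask: List[int], window: Tuple[int]):
--     s, e = window # start, end
--     w_offsets = offsets[s:e]
--     w_mask = mask[s:e]
--
--     m_offsets = list() # merged offsets
--     prev_in_span = False
--     span = None
--     for w_offset, in_span in zip(w_offsets, w_mask):
--         if prev_in_span:
--             if in_span:
--                 span[1] = w_offset[1]
--             else:
--                 m_offsets.append(span)
--                 span = None
--                 prev_in_span = False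
--         else:
--             if in_span:
--                 span = list(w_offset)
--                 prev_in_span = True
--
--     if span: # push the last span
--         m_offsets.append(span)
--     return m_offsets
-- ===== SOURCE B (Python) =====
-- from typing import List, Tuple
--
-- def merge_offsets(offsets: List[List[int]], mask: List[int], window: Tuple[int]):
--     s, e = window  # start, end
--     w_offsets = offsets[s:e]
--     w_mask = mask[s:e]
--     n = min(len(w_offsets), len(w_mask))
--
--     m_offsets = []
--     i = 0
--     while i < n:
--         if w_mask[i]:
--             j = i
--             while j + 1 < n and w_mask[j + 1]:
--                 j += 1
--             m_offsets.append([w_offsets[i][0], w_offsets[j][1]])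
--             i = j + 1
--         else:
--             i += 1
--     return m_offsets
-- ===== Notes on version B (the rewrite author's own statement) =====
-- stated objective: alternative
-- what changed: Replaces A's prev_in_span/span state machine with trailing push by an index-run scanner: find each maximal run of truthy mask values and emit [run_start_offset[0], run_end_offset[1]] directly.
-- outside the precondition, e.g. on merge_offsets([[1, 2, 3]], [1], (0, 1)): A returns [[1, 2, 3]], B returns [[1, 2]]; on merge_offsets([[]], [1], (0, 1)): A returns [], B raises IndexError; on merge_offsets([[5]], [1, 1], (0, 2)): A returns [[5]], B raises IndexError
import Mathlib
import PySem

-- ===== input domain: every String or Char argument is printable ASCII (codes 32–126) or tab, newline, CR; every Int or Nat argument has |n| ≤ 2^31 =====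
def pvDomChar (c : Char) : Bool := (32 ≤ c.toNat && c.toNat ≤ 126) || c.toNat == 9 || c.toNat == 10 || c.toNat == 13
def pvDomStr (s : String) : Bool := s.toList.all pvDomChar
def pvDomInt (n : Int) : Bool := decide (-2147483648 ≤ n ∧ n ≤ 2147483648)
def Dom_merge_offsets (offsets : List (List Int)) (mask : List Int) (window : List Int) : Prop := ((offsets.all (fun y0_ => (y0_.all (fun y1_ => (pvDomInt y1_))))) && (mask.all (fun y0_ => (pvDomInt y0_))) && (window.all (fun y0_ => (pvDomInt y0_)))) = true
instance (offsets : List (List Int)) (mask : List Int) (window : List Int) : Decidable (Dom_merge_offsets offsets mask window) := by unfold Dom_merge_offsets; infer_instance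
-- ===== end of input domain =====

-- B replaces A's prev_in_span/span state machine (with trailing push) by an index scanner
-- over maximal truthy runs of the mask; same O(n) cost, plainer decomposition.

-- ===== PORT A =====
-- one step of A's for-loop; state = (m_offsets, prev_in_span, span)
def mergeAStep (st : List (List Int) × Bool × Option (List Int)) (p : List Int × Int) :
    List (List Int) × Bool × Option (List Int) :=
  if st.2.1 then
    if p.2 ≠ 0 then
      -- span[1] = w_offset[1]; indices in range under Pre_ (offsets are pairs)
      (st.1, true, st.2.2.map (fun l => PySem.List.pySetD l 1 (p.1.getD 1 0)))
    else
      (st.1 ++ [st.2.2.getD []], false, none)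
  else
    if p.2 ≠ 0 then (st.1, true, some p.1) else st

-- 'if span:' — span not None and a nonempty list
def mergeAFinal (st : List (List Int) × Bool × Option (List Int)) : List (List Int) :=
  match st.2.2 with
  | some l => if l ≠ [] then st.1 ++ [l] else st.1
  | none => st.1

def merge_offsets (offsets : List (List Int)) (mask : List Int) (window : List Int) : List (List Int) :=
  let s := window.getD 0 0   -- s, e = window (window has exactly 2 entries under Pre_)
  let e := window.getD 1 0
  let wOffsets := PySem.List.slice offsets (some s) (some e)
  let wMask := PySem.List.slice mask (some s) (some e)
  mergeAFinal ((wOffsets.zip wMask).foldl mergeAStep ([], false, none))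

-- ===== PORT B =====
-- inner while loop 'while j+1 < n and w_mask[j+1]: j += 1'; the Nat argument is the exact
-- remaining iteration bound n-(j+1), so the fuel pattern IS the loop guard 'j+1 < n'
def mergeBRunEndAux (wMask : List Int) : Nat → Nat → Nat
  | 0, j => j
  | fuel + 1, j => if wMask.getD (j + 1) 0 ≠ 0 then mergeBRunEndAux wMask fuel (j + 1) else j

def mergeBRunEnd (wMask : List Int) (n j : Nat) : Nat := mergeBRunEndAux wMask (n - (j + 1)) j

-- outer while loop 'while i < n'; fuel bounds the remaining iterations (i strictly increases)
def mergeBScanAux (wOff : List (List Int)) (wMask : List Int) (n : Nat) : Nat → Nat → List (List Int)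
  | 0, _ => []
  | fuel + 1, i =>
    if i < n then
      if wMask.getD i 0 ≠ 0 then
        let j := mergeBRunEnd wMask n i
        [(wOff.getD i []).getD 0 0, (wOff.getD j []).getD 1 0] :: mergeBScanAux wOff wMask n fuel (j + 1)
      else mergeBScanAux wOff wMask n fuel (i + 1)
    else []

def mergeBScan (wOff : List (List Int)) (wMask : List Int) (n i : Nat) : List (List Int) :=
  mergeBScanAux wOff wMask n (n - i) i

def merge_offsets_alt (offsets : List (List Int)) (mask : List Int) (window : List Int) : List (List Int) :=
  let s := window.getD 0 0   -- s, e = window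
  let e := window.getD 1 0
  let wOffsets := PySem.List.slice offsets (some s) (some e)
  let wMask := PySem.List.slice mask (some s) (some e)
  let n := min wOffsets.length wMask.length
  mergeBScan wOffsets wMask n 0

-- ===== PRECONDITION & SPEC =====
-- Pre_ excludes inputs where A raises (window not an (s,e) pair → ValueError; a masked
-- offset shorter than 2 inside a longer span → IndexError) and inputs whose masked window
-- offsets are not pairs, on which A's echo of the whole malformed list is an artefact of
-- 'span = list(w_offset)' (B raises or returns the trimmed pair there).
def Pre_merge_offsets (offsets : List (List Int)) (mask : List Int) (window : List Int) : Prop :=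
  window.length = 2 ∧
  ∀ i < min (PySem.List.slice offsets (some (window.getD 0 0)) (some (window.getD 1 0))).length
            (PySem.List.slice mask (some (window.getD 0 0)) (some (window.getD 1 0))).length,
    (PySem.List.slice mask (some (window.getD 0 0)) (some (window.getD 1 0))).getD i 0 ≠ 0 →
    ((PySem.List.slice offsets (some (window.getD 0 0)) (some (window.getD 1 0))).getD i []).length = 2
instance (offsets : List (List Int)) (mask : List Int) (window : List Int) : Decidable (Pre_merge_offsets offsets mask window) := by unfold Pre_merge_offsets; infer_instance

def pvWitness_merge_offsets : List (List Int) × List Int × List Int :=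
  ([[0, 1], [2, 3], [4, 5]], ([1, 1, 0], [0, 3]))

def Spec_merge_offsets (offsets : List (List Int)) (mask : List Int) (window : List Int) (out : List (List Int)) : Prop := out = merge_offsets_alt offsets mask window
instance (offsets : List (List Int)) (mask : List Int) (window : List Int) (out : List (List Int)) : Decidable (Spec_merge_offsets offsets mask window out) := by unfold Spec_merge_offsets; infer_instance

-- ===== CLAIM (what is proved, stated in full; the proofs are below) =====
def Claim_equal_merge_offsets : Prop := ∀ (offsets : List (List Int)) (mask : List Int) (window : List Int), Dom_merge_offsets offsets mask window → Pre_merge_offsets offsets mask window → Spec_merge_offsets offsets mask window (merge_offsets offsets mask window)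

-- ===== LEMMAS AND PROOFS =====

theorem mergeBRunEndAux_ge (wMask : List Int) (fuel : Nat) : ∀ j : Nat, j ≤ mergeBRunEndAux wMask fuel j := by
  induction fuel with
  | zero => intro j; exact le_refl j
  | succ f ih =>
    intro j
    simp only [mergeBRunEndAux]
    split
    · have := ih (j + 1); omega
    · exact le_refl j

theorem mergeBRunEndAux_le (wMask : List Int) (fuel : Nat) : ∀ j : Nat, mergeBRunEndAux wMask fuel j ≤ j + fuel := by
  induction fuel with
  | zero => intro j; exact Nat.le_refl j
  | succ f ih =>
    intro j
    simp only [mergeBRunEndAux]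
    split
    · have := ih (j + 1); omega
    · omega

theorem mergeBRunEnd_ge (wMask : List Int) (n j : Nat) : j ≤ mergeBRunEnd wMask n j :=
  mergeBRunEndAux_ge wMask (n - (j + 1)) j

theorem mergeBRunEnd_lt (wMask : List Int) (n j : Nat) (h : j < n) : mergeBRunEnd wMask n j < n := by
  have := mergeBRunEndAux_le wMask (n - (j + 1)) j
  unfold mergeBRunEnd
  omega

theorem mergeBRunEnd_stop (wMask : List Int) (n k : Nat) (hk1 : k + 1 < n)
    (h0 : wMask.getD (k + 1) 0 = 0) : mergeBRunEnd wMask n k = k := by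
  unfold mergeBRunEnd
  rw [show n - (k + 1) = (n - (k + 2)) + 1 from by omega]
  simp only [mergeBRunEndAux]
  rw [if_neg (not_ne_iff.mpr h0)]

theorem mergeBRunEnd_step (wMask : List Int) (n k : Nat) (hk1 : k + 1 < n)
    (h0 : wMask.getD (k + 1) 0 ≠ 0) : mergeBRunEnd wMask n k = mergeBRunEnd wMask n (k + 1) := by
  unfold mergeBRunEnd
  rw [show n - (k + 1) = (n - (k + 1 + 1)) + 1 from by omega]
  simp only [mergeBRunEndAux]
  rw [if_pos h0]

theorem mergeBRunEnd_last (wMask : List Int) (n k : Nat) (hk1 : ¬ k + 1 < n) :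
    mergeBRunEnd wMask n k = k := by
  unfold mergeBRunEnd
  rw [show n - (k + 1) = 0 from by omega]
  rfl

theorem mergeBScanAux_congr (wOff : List (List Int)) (wMask : List Int) (n : Nat) :
    ∀ fuel fuel' i, n ≤ i + fuel → n ≤ i + fuel' →
      mergeBScanAux wOff wMask n fuel i = mergeBScanAux wOff wMask n fuel' i := by
  intro fuel
  induction fuel with
  | zero =>
    intro fuel' i h h'
    cases fuel' with
    | zero => rfl
    | succ f => simp [mergeBScanAux, show ¬ i < n from by omega]
  | succ f ihf =>
    intro fuel' i h h'
    cases fuel' with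
    | zero => simp [mergeBScanAux, show ¬ i < n from by omega]
    | succ f' =>
      simp only [mergeBScanAux]
      by_cases hi : i < n
      · rw [if_pos hi, if_pos hi]
        by_cases h0 : wMask.getD i 0 ≠ 0
        · rw [if_pos h0, if_pos h0]
          have hge := mergeBRunEnd_ge wMask n i
          exact congrArg _ (ihf f' (mergeBRunEnd wMask n i + 1) (by omega) (by omega))
        · rw [if_neg h0, if_neg h0]
          exact ihf f' (i + 1) (by omega) (by omega)
      · rw [if_neg hi, if_neg hi]

theorem mergeBScan_stop (wOff : List (List Int)) (wMask : List Int) (n i : Nat) (hi : ¬ i < n) :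
    mergeBScan wOff wMask n i = [] := by
  unfold mergeBScan
  rw [show n - i = 0 from by omega]
  rfl

theorem mergeBScan_skip (wOff : List (List Int)) (wMask : List Int) (n i : Nat) (hi : i < n)
    (h0 : wMask.getD i 0 = 0) : mergeBScan wOff wMask n i = mergeBScan wOff wMask n (i + 1) := by
  unfold mergeBScan
  rw [show n - i = (n - (i + 1)) + 1 from by omega]
  simp only [mergeBScanAux]
  rw [if_pos hi, if_neg (not_ne_iff.mpr h0)]

theorem mergeBScan_hit (wOff : List (List Int)) (wMask : List Int) (n i : Nat) (hi : i < n)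
    (h0 : wMask.getD i 0 ≠ 0) :
    mergeBScan wOff wMask n i =
      [(wOff.getD i []).getD 0 0, (wOff.getD (mergeBRunEnd wMask n i) []).getD 1 0]
        :: mergeBScan wOff wMask n (mergeBRunEnd wMask n i + 1) := by
  unfold mergeBScan
  rw [show n - i = (n - (i + 1)) + 1 from by omega]
  simp only [mergeBScanAux, if_pos hi, if_pos h0]
  refine congrArg _ ?_
  exact mergeBScanAux_congr wOff wMask n (n - (i + 1)) (n - (mergeBRunEnd wMask n i + 1))
    (mergeBRunEnd wMask n i + 1)
    (by have := mergeBRunEnd_ge wMask n i; omega)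
    (by have := mergeBRunEnd_lt wMask n i hi; omega)

-- the combined invariant: L1 (not in a span at index i) and L2 (in a span whose last
-- processed index is k), proved together by fuel induction
theorem merge_invariant (wOff : List (List Int)) (wMask : List Int)
    (h2 : ∀ i < min wOff.length wMask.length, wMask.getD i 0 ≠ 0 → (wOff.getD i []).length = 2)
    (m : Nat) :
    (∀ (i : Nat) (acc : List (List Int)),
        2 * (min wOff.length wMask.length - i) + 1 ≤ m →
        mergeAFinal (((wOff.zip wMask).drop i).foldl mergeAStep (acc, false, none)) =
          acc ++ mergeBScan wOff wMask (min wOff.length wMask.length) i) ∧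
    (∀ (k : Nat) (acc : List (List Int)) (a : Int),
        k < min wOff.length wMask.length →
        2 * (min wOff.length wMask.length - (k + 1)) + 2 ≤ m →
        mergeAFinal (((wOff.zip wMask).drop (k + 1)).foldl mergeAStep
            (acc, true, some [a, (wOff.getD k []).getD 1 0])) =
          acc ++ ([a, (wOff.getD (mergeBRunEnd wMask (min wOff.length wMask.length) k) []).getD 1 0]
            :: mergeBScan wOff wMask (min wOff.length wMask.length)
                 (mergeBRunEnd wMask (min wOff.length wMask.length) k + 1))) := by
  induction m with
  | zero => exact ⟨fun i acc h => by omega, fun k acc a hk h => by omega⟩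
  | succ m ih =>
    set n := min wOff.length wMask.length with hn
    constructor
    · intro i acc hm
      by_cases hi : i < n
      · have hiw : i < wOff.length := by omega
        have him : i < wMask.length := by omega
        have hz : (wOff.zip wMask).drop i = (wOff[i]'hiw, wMask[i]'him) :: (wOff.zip wMask).drop (i + 1) := by
          rw [List.drop_eq_getElem_cons (by simp [List.length_zip]; omega)]
          simp
        have hmaskD : wMask.getD i 0 = wMask[i]'him := List.getD_eq_getElem _ _ him
        rw [hz, List.foldl_cons]
        by_cases hmk : wMask[i]'him = 0
        · have hstep : mergeAStep (acc, false, none) (wOff[i]'hiw, wMask[i]'him) = (acc, false, none) := by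
            simp [mergeAStep, hmk]
          have hscan : mergeBScan wOff wMask n i = mergeBScan wOff wMask n (i + 1) := by
            exact mergeBScan_skip wOff wMask n i hi (by rw [hmaskD]; exact hmk)
          rw [hstep, hscan]
          exact ih.1 (i + 1) acc (by omega)
        · have hoff : wOff[i]'hiw = [(wOff.getD i []).getD 0 0, (wOff.getD i []).getD 1 0] := by
            have hD : wOff.getD i [] = wOff[i]'hiw := List.getD_eq_getElem _ _ hiw
            have hlen : (wOff[i]'hiw).length = 2 := by
              have := h2 i hi (by rw [hmaskD]; exact hmk)
              rwa [hD] at this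
            rw [hD]
            match hv : wOff[i]'hiw with
            | [x, y] => simp
            | [] => rw [hv] at hlen; simp at hlen
            | [x] => rw [hv] at hlen; simp at hlen
            | x :: y :: z :: t => rw [hv] at hlen; simp at hlen
          have hstep : mergeAStep (acc, false, none) (wOff[i]'hiw, wMask[i]'him) = (acc, true, some (wOff[i]'hiw)) := by
            simp [mergeAStep, hmk]
          have hscan : mergeBScan wOff wMask n i =
              [(wOff.getD i []).getD 0 0, (wOff.getD (mergeBRunEnd wMask n i) []).getD 1 0]
                :: mergeBScan wOff wMask n (mergeBRunEnd wMask n i + 1) := by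
            exact mergeBScan_hit wOff wMask n i hi (by rw [hmaskD]; exact hmk)
          rw [hstep, hscan, hoff]
          exact ih.2 i acc _ hi (by omega)
      · have hdrop : (wOff.zip wMask).drop i = [] :=
          List.drop_eq_nil_of_le (by simp [List.length_zip]; omega)
        have hscan : mergeBScan wOff wMask n i = [] := mergeBScan_stop wOff wMask n i hi
        rw [hdrop, hscan]
        simp [mergeAFinal]
    · intro k acc a hk hm
      by_cases hk1 : k + 1 < n
      · have hkw : k + 1 < wOff.length := by omega
        have hkm : k + 1 < wMask.length := by omega
        have hz : (wOff.zip wMask).drop (k + 1) = (wOff[k+1]'hkw, wMask[k+1]'hkm) :: (wOff.zip wMask).drop (k + 2) := by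
          rw [List.drop_eq_getElem_cons (by simp [List.length_zip]; omega)]
          simp
        have hmaskD : wMask.getD (k + 1) 0 = wMask[k+1]'hkm := List.getD_eq_getElem _ _ hkm
        have hD : wOff.getD (k + 1) [] = wOff[k+1]'hkw := List.getD_eq_getElem _ _ hkw
        rw [hz, List.foldl_cons]
        by_cases hmk : wMask[k+1]'hkm = 0
        · have hstep : mergeAStep (acc, true, some [a, (wOff.getD k []).getD 1 0]) (wOff[k+1]'hkw, wMask[k+1]'hkm)
              = (acc ++ [[a, (wOff.getD k []).getD 1 0]], false, none) := by
            simp [mergeAStep, hmk]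
          have hre : mergeBRunEnd wMask n k = k := mergeBRunEnd_stop wMask n k hk1 (by rw [hmaskD]; exact hmk)
          have hscan : mergeBScan wOff wMask n (k + 1) = mergeBScan wOff wMask n (k + 2) :=
            mergeBScan_skip wOff wMask n (k + 1) hk1 (by rw [hmaskD]; exact hmk)
          rw [hstep, hre, hscan]
          have := ih.1 (k + 2) (acc ++ [[a, (wOff.getD k []).getD 1 0]]) (by omega)
          rw [this]
          simp
        · have hstep : mergeAStep (acc, true, some [a, (wOff.getD k []).getD 1 0]) (wOff[k+1]'hkw, wMask[k+1]'hkm)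
              = (acc, true, some [a, (wOff.getD (k + 1) []).getD 1 0]) := by
            simp [mergeAStep, hmk, PySem.List.pySetD, PySem.List.pySet?, PySem.List.pyIdx?, List.getElem?_eq_getElem hkw]
          have hre : mergeBRunEnd wMask n k = mergeBRunEnd wMask n (k + 1) :=
            mergeBRunEnd_step wMask n k hk1 (by rw [hmaskD]; exact hmk)
          rw [hstep, hre]
          exact ih.2 (k + 1) acc a hk1 (by omega)
      · have hdrop : (wOff.zip wMask).drop (k + 1) = [] :=
          List.drop_eq_nil_of_le (by simp [List.length_zip]; omega)
        have hre : mergeBRunEnd wMask n k = k := mergeBRunEnd_last wMask n k hk1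
        have hscan : mergeBScan wOff wMask n (k + 1) = [] := mergeBScan_stop wOff wMask n (k + 1) hk1
        rw [hdrop, hre, hscan]
        simp [mergeAFinal]

-- ===== VERDICT (by name: the statement is the Claim_ definition above) =====
theorem merge_offsets_spec : Claim_equal_merge_offsets := by
  intro offsets mask window _hD hPre
  unfold Spec_merge_offsets merge_offsets merge_offsets_alt
  set s := window.getD 0 0
  set e := window.getD 1 0
  set wOff := PySem.List.slice offsets (some s) (some e) with hwo
  set wMask := PySem.List.slice mask (some s) (some e)
  have h2 : ∀ i < min wOff.length wMask.length, wMask.getD i 0 ≠ 0 → (wOff.getD i []).length = 2 :=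
    hPre.2
  have := (merge_invariant wOff wMask h2 (2 * (min wOff.length wMask.length) + 1)).1 0 []
    (by omega)
  simpa using this
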